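-- pv_equiv track=rewrite | github.com/ckoons/tekton-core | tekton-core/tekton/core/models/routing.py | select_model_for_task
-- ===== SOURCE A (Python) =====
-- from typing import Dict, List, Any, Optional, Callable
--
-- MODEL_PREFERENCES = {
--     "code": [
--         # Models best for code generation
--         (lambda name: "claude" in name and "opus" in name),  # Claude Opus
--         (lambda name: "gpt-4" in name or "gpt4" in name),  # GPT-4 family
--         (lambda name: "codellama" in name),  # CodeLlama
--         (lambda name: "claude" in name),  # Any Claude
--         (lambda name: "local" in name)  # Any local model
--     ],
--     "creative": [
--         # Models best for creative tasks
--         (lambda name: "claude" in name and "opus" in name),  # Claude Opus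
--         (lambda name: "gpt-4" in name or "gpt4" in name),  # GPT-4 family
--         (lambda name: "claude" in name),  # Any Claude
--         (lambda name: "llama" in name),  # Any Llama
--         (lambda name: "local" in name)  # Any local model
--     ],
--     "analytical": [
--         # Models best for analytical tasks
--         (lambda name: "claude" in name and "opus" in name),  # Claude Opus
--         (lambda name: "gpt-4" in name or "gpt4" in name),  # GPT-4 family
--         (lambda name: "claude" in name),  # Any Claude
--         (lambda name: "mixtral" in name),  # Mixtral
--         (lambda name: "local" in name)  # Any local model
--     ],
--     # Add more task types as needed
--     "embeddings": [
--         # Models best for embeddings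
--         (lambda name: "openai" in name and "embedding" in name),  # OpenAI embeddings
--         (lambda name: "local" in name and "llama" in name),  # Local Llama models
--         (lambda name: "local" in name),  # Any local model
--         (lambda name: "openai" in name)  # Any OpenAI model
--     ]
-- }
--
-- def select_model_for_task(
--     task_type: Optional[str],
--     available_adapters: List[str],
--     model_capabilities: Dict[str, Dict[str, Any]]
-- ) -> Optional[str]:
--     """
--     Select the best model for a specific task.
--
--     Args:
--         task_type: The type of task (code, creative, analytical, etc.)
--         available_adapters: List of available adapter names
--         model_capabilities: Dictionary of model capabilities
--
--     Returns:
--         The name of the selected adapter, or None if no suitable adapter found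
--     """
--     if not task_type:
--         task_type = "analytical"  # Default to analytical
--
--     # Filter for embedding-capable models if task is embeddings
--     if task_type == "embeddings":
--         available_adapters = [
--             name for name in available_adapters
--             if model_capabilities.get(name, {}).get("supports_embeddings", False)
--         ]
--
--     # Get task-specific preferences
--     if task_type in MODEL_PREFERENCES:
--         predicates = MODEL_PREFERENCES[task_type]
--     else:
--         # Default to analytical preferences if task type not specified
--         predicates = MODEL_PREFERENCES["analytical"]
--
--     # Find the best adapter based on preferences
--     for predicate in predicates:
--         for name in available_adapters:
--             if predicate(name):
--                 return name
--
--     # If no match found, return None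
--     return None
-- ===== SOURCE B (Python) =====
-- from typing import Dict, List, Any, Optional
--
-- # Preferences as data: for each task type an ordered list of clauses;
-- # a clause is a list of alternatives, an alternative a list of required substrings.
-- PREF_KEYWORDS = {
--     "code": [[["claude", "opus"]], [["gpt-4"], ["gpt4"]], [["codellama"]], [["claude"]], [["local"]]],
--     "creative": [[["claude", "opus"]], [["gpt-4"], ["gpt4"]], [["claude"]], [["llama"]], [["local"]]],
--     "analytical": [[["claude", "opus"]], [["gpt-4"], ["gpt4"]], [["claude"]], [["mixtral"]], [["local"]]],
--     "embeddings": [[["openai", "embedding"]], [["local", "llama"]], [["local"]], [["openai"]]],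
-- }
--
-- def select_model_for_task(
--     task_type: Optional[str],
--     available_adapters: List[str],
--     model_capabilities: Dict[str, Dict[str, Any]]
-- ) -> Optional[str]:
--     task = task_type or "analytical"
--     clauses = PREF_KEYWORDS.get(task, PREF_KEYWORDS["analytical"])
--     if task == "embeddings":
--         available_adapters = [
--             name for name in available_adapters
--             if model_capabilities.get(name, {}).get("supports_embeddings", False)
--         ]
--     # single pass over adapters, keeping the adapter whose first matching clause
--     # has the strictly smallest index (earliest adapter wins ties)
--     best_rank = len(clauses)
--     best_name = None
--     for name in available_adapters:
--         for i, clause in enumerate(clauses):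
--             if i >= best_rank:
--                 break
--             if any(all(kw in name for kw in alt) for alt in clause):
--                 best_rank, best_name = i, name
--                 break
--     return best_name
-- ===== Notes on version B (the rewrite author's own statement) =====
-- stated objective: alternative
-- what changed: Replaces A's lambda-predicate table and predicate-outer/adapter-inner short-circuit double scan by a pure-data keyword table (clauses of required-substring alternatives) and a single pass over the adapters that keeps the adapter whose first matching clause index strictly improves the best rank so far (earliest adapter wins ties).
import Mathlib
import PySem

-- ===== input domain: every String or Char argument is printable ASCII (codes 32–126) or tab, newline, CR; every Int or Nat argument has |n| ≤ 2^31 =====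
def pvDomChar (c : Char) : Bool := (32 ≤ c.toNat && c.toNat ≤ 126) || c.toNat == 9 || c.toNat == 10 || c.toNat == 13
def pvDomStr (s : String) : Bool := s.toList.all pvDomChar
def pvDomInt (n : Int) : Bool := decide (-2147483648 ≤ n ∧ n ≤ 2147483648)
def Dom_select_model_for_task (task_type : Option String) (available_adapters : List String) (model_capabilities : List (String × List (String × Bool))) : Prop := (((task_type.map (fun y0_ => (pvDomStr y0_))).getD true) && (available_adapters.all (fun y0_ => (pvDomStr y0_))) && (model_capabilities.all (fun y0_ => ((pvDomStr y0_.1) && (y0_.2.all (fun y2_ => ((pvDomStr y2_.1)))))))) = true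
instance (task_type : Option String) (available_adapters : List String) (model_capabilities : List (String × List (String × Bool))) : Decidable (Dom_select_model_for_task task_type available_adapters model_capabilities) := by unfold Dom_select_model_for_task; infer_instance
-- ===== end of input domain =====

-- B replaces A's lambda-predicate table and predicate-outer/adapter-inner double scan by a
-- pure-data keyword table and a single pass over the adapters keeping the strictly-best rank
-- (earliest adapter wins ties); same value everywhere (objective: alternative).

-- ===== PORT A =====
-- the MODEL_PREFERENCES constant (lambda lists, as in the source module)
def pvPrefsCode : List (String → Bool) :=
  [ fun n => PySem.Str.isIn "claude" n && PySem.Str.isIn "opus" n,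
    fun n => PySem.Str.isIn "gpt-4" n || PySem.Str.isIn "gpt4" n,
    fun n => PySem.Str.isIn "codellama" n,
    fun n => PySem.Str.isIn "claude" n,
    fun n => PySem.Str.isIn "local" n ]

def pvPrefsCreative : List (String → Bool) :=
  [ fun n => PySem.Str.isIn "claude" n && PySem.Str.isIn "opus" n,
    fun n => PySem.Str.isIn "gpt-4" n || PySem.Str.isIn "gpt4" n,
    fun n => PySem.Str.isIn "claude" n,
    fun n => PySem.Str.isIn "llama" n,
    fun n => PySem.Str.isIn "local" n ]

def pvPrefsAnalytical : List (String → Bool) :=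
  [ fun n => PySem.Str.isIn "claude" n && PySem.Str.isIn "opus" n,
    fun n => PySem.Str.isIn "gpt-4" n || PySem.Str.isIn "gpt4" n,
    fun n => PySem.Str.isIn "claude" n,
    fun n => PySem.Str.isIn "mixtral" n,
    fun n => PySem.Str.isIn "local" n ]

def pvPrefsEmbeddings : List (String → Bool) :=
  [ fun n => PySem.Str.isIn "openai" n && PySem.Str.isIn "embedding" n,
    fun n => PySem.Str.isIn "local" n && PySem.Str.isIn "llama" n,
    fun n => PySem.Str.isIn "local" n,
    fun n => PySem.Str.isIn "openai" n ]

-- MODEL_PREFERENCES[t] with the 'default to analytical' fallback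
def pvPrefs (t : String) : List (String → Bool) :=
  if t = "code" then pvPrefsCode
  else if t = "creative" then pvPrefsCreative
  else if t = "analytical" then pvPrefsAnalytical
  else if t = "embeddings" then pvPrefsEmbeddings
  else pvPrefsAnalytical

-- model_capabilities.get(name, {}).get("supports_embeddings", False) on the association list
def pvCapsGet (mc : List (String × List (String × Bool))) (name : String) : Bool :=
  ((((mc.find? (fun kv => kv.1 == name)).map (·.2)).getD []).find?
      (fun kv => kv.1 == "supports_embeddings")).map (·.2) |>.getD false

-- 'if not task_type: task_type = "analytical"' (None and "" are falsy)
def pvTaskType (task_type : Option String) : String :=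
  match task_type with
  | none => "analytical"
  | some s => if s = "" then "analytical" else s

-- A's nested loops: for predicate in predicates: for name in adapters: if predicate(name): return name
def pvScanA : List (String → Bool) → List String → Option String
  | [], _ => none
  | p :: ps, ads =>
    match ads.find? p with
    | some n => some n
    | none => pvScanA ps ads

def select_model_for_task (task_type : Option String) (available_adapters : List String) (model_capabilities : List (String × List (String × Bool))) : Option String :=
  let t := pvTaskType task_type
  let ads := if t = "embeddings" then available_adapters.filter (fun n => pvCapsGet model_capabilities n) else available_adapters
  pvScanA (pvPrefs t) ads

-- ===== PORT B =====
-- PREF_KEYWORDS: preferences as data — clauses of alternatives, each a list of required substrings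
def pvClausesCode : List (List (List String)) :=
  [[["claude", "opus"]], [["gpt-4"], ["gpt4"]], [["codellama"]], [["claude"]], [["local"]]]
def pvClausesCreative : List (List (List String)) :=
  [[["claude", "opus"]], [["gpt-4"], ["gpt4"]], [["claude"]], [["llama"]], [["local"]]]
def pvClausesAnalytical : List (List (List String)) :=
  [[["claude", "opus"]], [["gpt-4"], ["gpt4"]], [["claude"]], [["mixtral"]], [["local"]]]
def pvClausesEmbeddings : List (List (List String)) :=
  [[["openai", "embedding"]], [["local", "llama"]], [["local"]], [["openai"]]]

-- PREF_KEYWORDS.get(task, PREF_KEYWORDS["analytical"])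
def pvClauses : String → List (List (List String))
  | "code" => pvClausesCode
  | "creative" => pvClausesCreative
  | "analytical" => pvClausesAnalytical
  | "embeddings" => pvClausesEmbeddings
  | _ => pvClausesAnalytical

-- any(all(kw in name for kw in alt) for alt in clause)
def pvClauseHit (clause : List (List String)) (name : String) : Bool :=
  clause.any (fun alt => alt.all (fun kw => PySem.Str.isIn kw name))

-- the inner 'for i, clause in enumerate(clauses): if i >= best_rank: break; if hit: return i'
def pvFindRank : List (List (List String)) → String → Nat → Option Nat
  | [], _, _ => none
  | c :: cs, name, bound =>
    if bound = 0 then none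
    else if pvClauseHit c name then some 0
    else (pvFindRank cs name (bound - 1)).map (· + 1)

-- one iteration of B's adapter loop over the state (best_rank, best_name)
def pvLoopB (cs : List (List (List String))) (st : Nat × Option String) (name : String) : Nat × Option String :=
  match pvFindRank cs name st.1 with
  | some r => (r, some name)
  | none => st

-- task_type or "analytical"
def pvTaskB : Option String → String
  | some s => if s.length ≠ 0 then s else "analytical"
  | none => "analytical"

-- model_capabilities.get(name, {}).get("supports_embeddings", False) via List.lookup
def pvEmbOK (mc : List (String × List (String × Bool))) (name : String) : Bool :=
  match mc.lookup name with
  | none => false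
  | some caps => (caps.lookup "supports_embeddings").getD false

def select_model_for_task_alt (task_type : Option String) (available_adapters : List String) (model_capabilities : List (String × List (String × Bool))) : Option String :=
  let task := pvTaskB task_type
  let cs := pvClauses task
  let ads := if task = "embeddings" then available_adapters.filter (pvEmbOK model_capabilities) else available_adapters
  (ads.foldl (pvLoopB cs) (cs.length, none)).2

-- ===== PRECONDITION & SPEC =====
def Spec_select_model_for_task (task_type : Option String) (available_adapters : List String) (model_capabilities : List (String × List (String × Bool))) (out : Option String) : Prop := out = select_model_for_task_alt task_type available_adapters model_capabilities
instance (task_type : Option String) (available_adapters : List String) (model_capabilities : List (String × List (String × Bool))) (out : Option String) : Decidable (Spec_select_model_for_task task_type available_adapters model_capabilities out) := by unfold Spec_select_model_for_task; infer_instance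

-- ===== CLAIM (what is proved, stated in full; the proofs are below) =====
def Claim_equal_select_model_for_task : Prop := ∀ (task_type : Option String) (available_adapters : List String) (model_capabilities : List (String × List (String × Bool))), Dom_select_model_for_task task_type available_adapters model_capabilities → Spec_select_model_for_task task_type available_adapters model_capabilities (select_model_for_task task_type available_adapters model_capabilities)

-- ===== LEMMAS AND PROOFS =====

-- A-side rank of a name: index of the first matching predicate (= length if none matches)
def pvRank : List (String → Bool) → String → Nat
  | [], _ => 0
  | p :: ps, n => if p n then 0 else pvRank ps n + 1

-- pvFindRank over the predicate list instead of the data list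
def pvFindRankP : List (String → Bool) → String → Nat → Option Nat
  | [], _, _ => none
  | p :: ps, n, bound =>
    if bound = 0 then none
    else if p n then some 0
    else (pvFindRankP ps n (bound - 1)).map (· + 1)

-- Option-state version of B's loop, used as a stepping stone to pvScanA
def pvStep (ps : List (String → Bool)) (best : Option (Nat × String)) (name : String) : Option (Nat × String) :=
  let r := pvRank ps name
  if r < ps.length then
    match best with
    | none => some (r, name)
    | some (b, m) => if r < b then some (r, name) else some (b, m)
  else best

-- representation of the Option state as B's (best_rank, best_name) pair
def pvAbs (len : Nat) : Option (Nat × String) → Nat × Option String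
  | none => (len, none)
  | some (r, m) => (r, some m)

def pvInv (len : Nat) : Option (Nat × String) → Prop
  | none => True
  | some (r, _) => r < len

theorem pvFindRankP_char (ps : List (String → Bool)) (n : String) :
    ∀ b, pvFindRankP ps n b =
      if pvRank ps n < b ∧ pvRank ps n < ps.length then some (pvRank ps n) else none := by
  induction ps with
  | nil => intro b; simp [pvFindRankP, pvRank]
  | cons p ps ih =>
    intro b
    simp only [pvFindRankP, pvRank, ih (b - 1), List.length_cons]
    by_cases hb : b = 0
    · subst hb; simp
    · by_cases hp : p n <;> split_ifs <;> simp_all <;> omega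

theorem pvFindRank_code (n : String) (b : Nat) :
    pvFindRank pvClausesCode n b = pvFindRankP pvPrefsCode n b := by
  simp [pvFindRank, pvFindRankP, pvClauseHit, pvClausesCode, pvPrefsCode]

theorem pvFindRank_creative (n : String) (b : Nat) :
    pvFindRank pvClausesCreative n b = pvFindRankP pvPrefsCreative n b := by
  simp [pvFindRank, pvFindRankP, pvClauseHit, pvClausesCreative, pvPrefsCreative]

theorem pvFindRank_analytical (n : String) (b : Nat) :
    pvFindRank pvClausesAnalytical n b = pvFindRankP pvPrefsAnalytical n b := by
  simp [pvFindRank, pvFindRankP, pvClauseHit, pvClausesAnalytical, pvPrefsAnalytical]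

theorem pvFindRank_embeddings (n : String) (b : Nat) :
    pvFindRank pvClausesEmbeddings n b = pvFindRankP pvPrefsEmbeddings n b := by
  simp [pvFindRank, pvFindRankP, pvClauseHit, pvClausesEmbeddings, pvPrefsEmbeddings]

theorem pvClauses_prefs (t : String) (n : String) (b : Nat) :
    pvFindRank (pvClauses t) n b = pvFindRankP (pvPrefs t) n b := by
  unfold pvClauses pvPrefs
  split <;> simp_all [pvFindRank_code, pvFindRank_creative, pvFindRank_analytical, pvFindRank_embeddings]

theorem pvClauses_len (t : String) : (pvClauses t).length = (pvPrefs t).length := by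
  unfold pvClauses pvPrefs
  split <;> simp_all [pvClausesCode, pvClausesCreative, pvClausesAnalytical, pvClausesEmbeddings,
    pvPrefsCode, pvPrefsCreative, pvPrefsAnalytical, pvPrefsEmbeddings]

-- the two loops stay in lockstep through the representation pvAbs
theorem pvStep_comm (ps : List (String → Bool)) (cs : List (List (List String)))
    (hEq : ∀ n b, pvFindRank cs n b = pvFindRankP ps n b)
    (s : Option (Nat × String)) (hInv : pvInv ps.length s) (name : String) :
    pvLoopB cs (pvAbs ps.length s) name = pvAbs ps.length (pvStep ps s name) ∧
      pvInv ps.length (pvStep ps s name) := by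
  rcases s with _ | ⟨b, m⟩ <;>
    simp only [pvLoopB, pvAbs, pvStep, pvInv, hEq, pvFindRankP_char] at * <;>
    split_ifs <;> simp_all [pvAbs, pvInv] <;> omega

theorem pvFoldl_comm (ps : List (String → Bool)) (cs : List (List (List String)))
    (hEq : ∀ n b, pvFindRank cs n b = pvFindRankP ps n b) (ads : List String) :
    ∀ s, pvInv ps.length s →
      ads.foldl (pvLoopB cs) (pvAbs ps.length s) = pvAbs ps.length (ads.foldl (pvStep ps) s) := by
  induction ads with
  | nil => intro s _; rfl
  | cons n rest ih =>
    intro s hInv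
    obtain ⟨h1, h2⟩ := pvStep_comm ps cs hEq s hInv n
    simp only [List.foldl_cons, h1, ih _ h2]

-- front recursion computing what the option-state fold computes (earliest adapter wins rank ties)
def pvRecBest (ps : List (String → Bool)) : List String → Option (Nat × String)
  | [] => none
  | n :: rest =>
    let r := pvRank ps n
    let b := pvRecBest ps rest
    if r < ps.length then
      match b with
      | none => some (r, n)
      | some (b0, m) => if r ≤ b0 then some (r, n) else some (b0, m)
    else b

-- combining an accumulator (which wins ties) with the best of the remaining list
def pvMerge : Option (Nat × String) → Option (Nat × String) → Option (Nat × String)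
  | none, r => r
  | some a, none => some a
  | some a, some (r, nm) => if r < a.1 then some (r, nm) else some a

theorem pvFoldl_eq_merge_recBest (ps : List (String → Bool)) (ads : List String) :
    ∀ acc, ads.foldl (pvStep ps) acc = pvMerge acc (pvRecBest ps ads) := by
  induction ads with
  | nil => intro acc; cases acc <;> simp [pvRecBest, pvMerge]
  | cons n rest ih =>
    intro acc
    show List.foldl (pvStep ps) (pvStep ps acc n) rest = _
    rw [ih]
    rcases acc with _ | ⟨b0, m⟩ <;>
      simp only [pvStep, pvRecBest, pvMerge] <;>
      rcases h : pvRecBest ps rest with _ | ⟨r0, m0⟩ <;>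
      split_ifs <;>
      simp_all [pvMerge] <;> (try split_ifs) <;> (try simp_all) <;> omega

theorem pvRecBest_nil_preds (ads : List String) : pvRecBest [] ads = none := by
  induction ads with
  | nil => rfl
  | cons n rest ih => simp [pvRecBest, ih, pvRank]

theorem pvRecBest_cons (p : String → Bool) (ps : List (String → Bool)) (ads : List String) :
    pvRecBest (p :: ps) ads =
      match ads.find? p with
      | some n => some (0, n)
      | none => (pvRecBest ps ads).map (fun x => (x.1 + 1, x.2)) := by
  induction ads with
  | nil => rfl
  | cons n rest ih =>
    by_cases hp : p n
    · simp only [pvRecBest, pvRank, hp, if_true, List.find?_cons_of_pos hp, ih]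
      rcases h : rest.find? p with _ | m <;> rcases h2 : pvRecBest ps rest with _ | ⟨r0, m0⟩ <;>
        simp_all [List.length_cons]
    · have hf : List.find? p (n :: rest) = List.find? p rest := by
        simp [hp]
      simp only [pvRecBest, pvRank, hp, hf, ih]
      rcases h : rest.find? p with _ | m <;>
        rcases h2 : pvRecBest ps rest with _ | ⟨r0, m0⟩ <;>
        simp_all [List.length_cons] <;> (try split_ifs) <;> (try simp_all)

theorem pvRecBest_snd_eq_scanA (ps : List (String → Bool)) (ads : List String) :
    (pvRecBest ps ads).map (·.2) = pvScanA ps ads := by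
  induction ps with
  | nil => simp [pvRecBest_nil_preds, pvScanA]
  | cons p ps ih =>
    rw [pvRecBest_cons]
    rcases h : ads.find? p with _ | n
    · simp only [pvScanA, h, Option.map_map]; exact ih
    · simp [pvScanA, h]

theorem pvTaskB_eq (t : Option String) : pvTaskB t = pvTaskType t := by
  rcases t with _ | s
  · rfl
  · simp only [pvTaskB, pvTaskType]
    by_cases h : s = "" <;> simp [h, String.length_eq_zero_iff]

-- List.lookup as a find? (first-match) on the association list
theorem pvLookup_eq_find {α β : Type} [BEq α] [LawfulBEq α] (l : List (α × β)) (a : α) :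
    l.lookup a = (l.find? (fun kv => kv.1 == a)).map (·.2) := by
  induction l with
  | nil => rfl
  | cons kv rest ih =>
    rcases kv with ⟨k, v⟩
    by_cases h : k = a
    · subst h; simp [List.lookup]
    · have h1 : (a == k) = false := by simp [Ne.symm h]
      have h2 : (k == a) = false := by simp [h]
      simp [List.lookup, h1, h2, ih]

theorem pvEmbOK_eq (mc : List (String × List (String × Bool))) (n : String) :
    pvEmbOK mc n = pvCapsGet mc n := by
  simp only [pvEmbOK, pvCapsGet, pvLookup_eq_find]
  rcases h : mc.find? (fun kv => kv.1 == n) with _ | ⟨k, caps⟩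
  · simp [h]
  · simp [h]

-- ===== VERDICT (by name: the statement is the Claim_ definition above) =====
theorem select_model_for_task_spec : Claim_equal_select_model_for_task := by
  intro task_type available_adapters model_capabilities _
  show _ = _
  simp only [select_model_for_task, select_model_for_task_alt, pvTaskB_eq]
  have hfil : (if pvTaskType task_type = "embeddings" then
      available_adapters.filter (pvEmbOK model_capabilities) else available_adapters) =
      (if pvTaskType task_type = "embeddings" then
      available_adapters.filter (fun n => pvCapsGet model_capabilities n) else available_adapters) := by
    split_ifs with h
    · exact List.filter_congr (fun n _ => by rw [pvEmbOK_eq])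
    · rfl
  rw [hfil, pvClauses_len]
  have hc := pvFoldl_comm (pvPrefs (pvTaskType task_type)) (pvClauses (pvTaskType task_type))
    (pvClauses_prefs _)
    (if pvTaskType task_type = "embeddings" then
      available_adapters.filter (fun n => pvCapsGet model_capabilities n) else available_adapters)
    none trivial
  simp only [pvAbs] at hc
  rw [hc, pvFoldl_eq_merge_recBest, ← pvRecBest_snd_eq_scanA]
  cases h : pvRecBest (pvPrefs (pvTaskType task_type))
      (if pvTaskType task_type = "embeddings" then
        available_adapters.filter (fun n => pvCapsGet model_capabilities n) else available_adapters) with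
  | none => simp [pvMerge, pvAbs]
  | some p => cases p; simp [pvMerge, pvAbs]
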